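-- pv_equiv track=rewrite | github.com/ForeverHaibara/Triple-SOS | src/utils/text_process.py | _preprocess_text_completion
-- ===== SOURCE A (Python) =====
-- def _preprocess_text_completion(poly: str):
--     """
--     Complete the polynomial with * and ^. E.g.
--     1/5a3b2c   ->   1/5*a^3*b^2*c
--     """
--     poly = poly.replace(' ','')
--     i = 0
--     while i < len(poly) - 1:
--         if 48 <= ord(poly[i]) <= 57: # '0'~'9'
--             if poly[i+1] == '(' or 97 <= ord(poly[i+1]) <= 122: # alphabets
--                 poly = poly[:i+1] + '*' + poly[i+1:]
--                 i += 1
--         elif poly[i] == ')' or 97 <= ord(poly[i]) <= 122: # alphabets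
--             if poly[i+1] == '(' or 97 <= ord(poly[i+1]) <= 122:
--                 poly = poly[:i+1] + '*' + poly[i+1:]
--                 i += 1
--             elif 48 <= ord(poly[i+1]) <= 57: # '0'~'9'
--                 poly = poly[:i+1] + '^' + poly[i+1:]
--                 i += 1
--         i += 1
--
--     poly = poly.replace('s*q*r*t*','sqrt')
--     return poly
-- ===== SOURCE B (Python) =====
-- def _preprocess_text_completion(poly: str):
--     """
--     Complete the polynomial with * and ^. E.g.
--     1/5a3b2c   ->   1/5*a^3*b^2*c
--     """
--     s = poly.replace(' ', '')
--     parts = []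
--     for c, d in zip(s, s[1:]):
--         parts.append(c)
--         if c.isdigit():
--             if d == '(' or 'a' <= d <= 'z':
--                 parts.append('*')
--         elif c == ')' or 'a' <= c <= 'z':
--             if d == '(' or 'a' <= d <= 'z':
--                 parts.append('*')
--             elif d.isdigit():
--                 parts.append('^')
--     if s:
--         parts.append(s[-1])
--     return ''.join(parts).replace('s*q*r*t*', 'sqrt')
-- ===== Notes on version B (the rewrite author's own statement) =====
-- stated objective: faster
-- what changed: Replaced A's while-loop that re-slices and rebuilds the growing string on every operator insertion (with manual index skipping) by a single pass over adjacent character pairs of the space-stripped input that emits each character plus its connector into a list joined once at the end.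
import Mathlib
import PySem

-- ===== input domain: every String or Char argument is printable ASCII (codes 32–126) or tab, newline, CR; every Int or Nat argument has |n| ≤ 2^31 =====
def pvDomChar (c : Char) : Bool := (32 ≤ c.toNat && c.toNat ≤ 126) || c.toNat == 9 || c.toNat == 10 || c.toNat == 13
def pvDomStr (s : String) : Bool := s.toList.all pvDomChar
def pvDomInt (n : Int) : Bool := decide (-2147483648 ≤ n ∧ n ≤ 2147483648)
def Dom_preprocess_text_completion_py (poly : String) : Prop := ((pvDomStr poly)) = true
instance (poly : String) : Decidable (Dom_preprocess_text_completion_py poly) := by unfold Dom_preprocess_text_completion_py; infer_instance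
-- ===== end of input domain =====

-- B is a single pass over adjacent character pairs emitting each character plus its connector into
-- a list joined once, instead of A's index loop that re-slices and rebuilds the growing string on
-- every insertion (faster: one pass and one join instead of a string rebuild per insertion).

-- ===== PORT A =====
-- A's while loop: state is the current string and index i; an insertion rebuilds the string from
-- slices poly[:i+1] + op + poly[i+1:] (indices in range, so take/drop are exact) and skips ahead.
def pvLoopA (p : List Char) (i : Nat) : List Char :=
  if _h : i + 1 < p.length then
    if 48 ≤ (p.getD i ' ').toNat ∧ (p.getD i ' ').toNat ≤ 57 then
      if p.getD (i + 1) ' ' = '(' ∨ (97 ≤ (p.getD (i + 1) ' ').toNat ∧ (p.getD (i + 1) ' ').toNat ≤ 122) then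
        pvLoopA (p.take (i + 1) ++ '*' :: p.drop (i + 1)) (i + 2)
      else pvLoopA p (i + 1)
    else if p.getD i ' ' = ')' ∨ (97 ≤ (p.getD i ' ').toNat ∧ (p.getD i ' ').toNat ≤ 122) then
      if p.getD (i + 1) ' ' = '(' ∨ (97 ≤ (p.getD (i + 1) ' ').toNat ∧ (p.getD (i + 1) ' ').toNat ≤ 122) then
        pvLoopA (p.take (i + 1) ++ '*' :: p.drop (i + 1)) (i + 2)
      else if 48 ≤ (p.getD (i + 1) ' ').toNat ∧ (p.getD (i + 1) ' ').toNat ≤ 57 then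
        pvLoopA (p.take (i + 1) ++ '^' :: p.drop (i + 1)) (i + 2)
      else pvLoopA p (i + 1)
    else pvLoopA p (i + 1)
  else p
termination_by p.length - i
decreasing_by all_goals first | omega | (simp; omega)

def preprocess_text_completion_py (poly : String) : String :=
  let p := (PySem.Str.replace poly " " "").toList
  PySem.Str.replace (String.ofList (pvLoopA p 0)) "s*q*r*t*" "sqrt"

-- ===== PORT B =====
-- the characters emitted for one adjacent pair (c, d): c itself plus its connector, if any
def pvPairB (c d : Char) : List Char :=
  if c.isDigit then
    if d = '(' ∨ ('a' ≤ d ∧ d ≤ 'z') then [c, '*'] else [c]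
  else if c = ')' ∨ ('a' ≤ c ∧ c ≤ 'z') then
    if d = '(' ∨ ('a' ≤ d ∧ d ≤ 'z') then [c, '*']
    else if d.isDigit then [c, '^'] else [c]
  else [c]

def preprocess_text_completion_py_alt (poly : String) : String :=
  let s := (PySem.Str.replace poly " " "").toList
  let parts := (s.zip (s.drop 1)).flatMap (fun cd => pvPairB cd.1 cd.2)
    ++ (if s = [] then [] else [s.getLast!])
  PySem.Str.replace (String.ofList parts) "s*q*r*t*" "sqrt"

-- ===== PRECONDITION & SPEC =====
def Spec_preprocess_text_completion_py (poly : String) (out : String) : Prop := out = preprocess_text_completion_py_alt poly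
instance (poly : String) (out : String) : Decidable (Spec_preprocess_text_completion_py poly out) := by unfold Spec_preprocess_text_completion_py; infer_instance

-- ===== CLAIM (what is proved, stated in full; the proofs are below) =====
def Claim_equal_preprocess_text_completion_py : Prop := ∀ (poly : String), Dom_preprocess_text_completion_py poly → Spec_preprocess_text_completion_py poly (preprocess_text_completion_py poly)

-- ===== LEMMAS AND PROOFS =====

-- the pair-by-pair expansion of a suffix of the string
def pvExpand : List Char → List Char
  | [] => []
  | [c] => [c]
  | c :: d :: t => pvPairB c d ++ pvExpand (d :: t)

lemma pvExpand_small (p : List Char) (h : p.length ≤ 1) : pvExpand p = p := by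
  match p, h with
  | [], _ => rfl
  | [c], _ => rfl

-- character-class bridges between B's comparisons and A's ord ranges
lemma pvAlpha_iff (c : Char) : ('a' ≤ c ∧ c ≤ 'z') ↔ (97 ≤ c.toNat ∧ c.toNat ≤ 122) := by
  rw [Char.le_def, Char.le_def, UInt32.le_iff_toNat_le, UInt32.le_iff_toNat_le]
  constructor <;> (intro h; exact h)

lemma pvDigit_iff (c : Char) : c.isDigit = true ↔ (48 ≤ c.toNat ∧ c.toNat ≤ 57) := by
  simp [Char.isDigit, UInt32.le_iff_toNat_le]

-- pvPairB expressed with A's ord-range conditions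
lemma pvPairB_ord (c d : Char) :
    pvPairB c d =
      if 48 ≤ c.toNat ∧ c.toNat ≤ 57 then
        if d = '(' ∨ (97 ≤ d.toNat ∧ d.toNat ≤ 122) then [c, '*'] else [c]
      else if c = ')' ∨ (97 ≤ c.toNat ∧ c.toNat ≤ 122) then
        if d = '(' ∨ (97 ≤ d.toNat ∧ d.toNat ≤ 122) then [c, '*']
        else if 48 ≤ d.toNat ∧ d.toNat ≤ 57 then [c, '^'] else [c]
      else [c] := by
  unfold pvPairB
  simp only [pvDigit_iff, pvAlpha_iff]

lemma pvDrop_two (p : List Char) (i : Nat) (h : i + 1 < p.length) :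
    p.drop i = p[i] :: p[i + 1] :: p.drop (i + 2) := by
  rw [List.drop_eq_getElem_cons (by omega), List.drop_eq_getElem_cons (by omega)]

lemma pvTake_succ' (p : List Char) (i : Nat) (h : i < p.length) :
    p.take (i + 1) = p.take i ++ [p[i]] := by
  rw [List.take_add_one, List.getElem?_eq_getElem h]
  rfl

-- the loop, from index i on, expands the remaining suffix pair by pair
lemma pvLoopA_eq (p : List Char) (i : Nat) :
    pvLoopA p i = p.take i ++ pvExpand (p.drop i) := by
  rw [pvLoopA]
  by_cases h : i + 1 < p.length
  · rw [dif_pos h]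
    have hi : i < p.length := by omega
    have hc : p.getD i ' ' = p[i] := List.getD_eq_getElem p ' ' hi
    have hd : p.getD (i + 1) ' ' = p[i + 1] := List.getD_eq_getElem p ' ' h
    have hlt : (p.take (i + 1)).length = i + 1 := by
      simp [List.length_take]; omega
    have hdrop : p.drop i = p[i] :: p[i + 1] :: p.drop (i + 2) := pvDrop_two p i h
    have htk : p.take (i + 1) = p.take i ++ [p[i]] := pvTake_succ' p i hi
    have hexp : pvExpand (p.drop i) = pvPairB p[i] p[i + 1] ++ pvExpand (p.drop (i + 1)) := by
      rw [hdrop]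
      rw [pvExpand]
      rw [← List.drop_eq_getElem_cons (l := p) (i := i + 1) h]
    have hins : ∀ op : Char,
        pvLoopA (p.take (i + 1) ++ op :: p.drop (i + 1)) (i + 2)
          = p.take (i + 1) ++ op :: pvExpand (p.drop (i + 1)) := by
      intro op
      rw [pvLoopA_eq (p.take (i + 1) ++ op :: p.drop (i + 1)) (i + 2)]
      have h1 : (p.take (i + 1) ++ op :: p.drop (i + 1)).take (i + 2)
          = p.take (i + 1) ++ [op] := by
        rw [List.take_append]
        simp [hlt]
      have h2 : (p.take (i + 1) ++ op :: p.drop (i + 1)).drop (i + 2)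
          = p.drop (i + 1) := by
        rw [List.drop_append]
        simp [hlt]
      rw [h1, h2]
      simp only [List.append_assoc, List.cons_append, List.nil_append]
    rw [hc, hd]
    split_ifs with b1 b2 b3 b4 b5
    · rw [hins, hexp, pvPairB_ord, if_pos b1, if_pos b2, htk]
      simp only [List.append_assoc, List.cons_append, List.nil_append]
    · rw [pvLoopA_eq p (i + 1), hexp, pvPairB_ord, if_pos b1, if_neg b2, htk]
      simp only [List.append_assoc, List.cons_append, List.nil_append]
    · rw [hins, hexp, pvPairB_ord, if_neg b1, if_pos b3, if_pos b4, htk]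
      simp only [List.append_assoc, List.cons_append, List.nil_append]
    · rw [hins, hexp, pvPairB_ord, if_neg b1, if_pos b3, if_neg b4, if_pos b5, htk]
      simp only [List.append_assoc, List.cons_append, List.nil_append]
    · rw [pvLoopA_eq p (i + 1), hexp, pvPairB_ord, if_neg b1, if_pos b3, if_neg b4, if_neg b5, htk]
      simp only [List.append_assoc, List.cons_append, List.nil_append]
    · rw [pvLoopA_eq p (i + 1), hexp, pvPairB_ord, if_neg b1, if_neg b3, htk]
      simp only [List.append_assoc, List.cons_append, List.nil_append]
  · rw [dif_neg h, pvExpand_small _ (by rw [List.length_drop]; omega), List.take_append_drop]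
termination_by p.length - i
decreasing_by
  all_goals try simp only [List.length_append, List.length_take, List.length_cons, List.length_drop]
  all_goals omega

-- B's parts expression equals pvExpand
lemma pvExpand_eq_flat (s : List Char) :
    pvExpand s = (s.zip (s.drop 1)).flatMap (fun cd => pvPairB cd.1 cd.2)
      ++ (if s = [] then [] else [s.getLast!]) := by
  match s with
  | [] => rfl
  | [c] => rfl
  | c :: d :: t =>
    rw [pvExpand, pvExpand_eq_flat (d :: t)]
    simp [List.getLast!]

-- ===== VERDICT (by name: the statement is the Claim_ definition above) =====
theorem preprocess_text_completion_py_spec : Claim_equal_preprocess_text_completion_py := by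
  intro poly _
  unfold Spec_preprocess_text_completion_py preprocess_text_completion_py preprocess_text_completion_py_alt
  simp only []
  rw [pvLoopA_eq, pvExpand_eq_flat]
  simp
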